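-- pv_equiv track=rewrite | github.com/JJH12234/abaqus | sTPM_test1033DB.py | rename_duplicates
-- ===== SOURCE A (Python) =====
-- def rename_duplicates(lst):
--     # 此方法用于重命名列表中重复的元素，为其添加后缀（如 item-1, item-2）。
--     # 导入 Counter 和 defaultdict，确保它们在文件顶部被导入。
--     from collections import Counter, defaultdict
--     # 统计每个元素的总出现次数
--     freq = Counter(lst)
--     # 用于记录每个重复元素目前出现的次数
--     occurrence = defaultdict(int)
--     # 初始化结果列表。
--     result = []
--     # 遍历输入列表中的每个元素。
--     for item in lst:
--         # 如果元素出现多次，则添加后缀。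
--         if freq[item] > 1:
--             # 增加该元素的出现次数计数。
--             occurrence[item] += 1
--             # 将带有后缀的元素添加到结果列表。
--             result.append("{}-{}".format(item, occurrence[item]))
--         else:
--             # 如果元素不重复，则直接添加到结果列表。
--             result.append(item)
--     # 返回处理后的列表。
--     return result
-- ===== SOURCE B (Python) =====
-- def rename_duplicates(lst):
--     # Group: map each element to the list of all indices where it appears (one pass),
--     # then scatter numbered names onto a copy of the list for groups of size > 1.
--     from collections import defaultdict
--     positions = defaultdict(list)
--     for idx, item in enumerate(lst):
--         positions[item].append(idx)
--     result = list(lst)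
--     for item, idxs in positions.items():
--         if len(idxs) > 1:
--             for k, idx in enumerate(idxs, 1):
--                 result[idx] = "{}-{}".format(item, k)
--     return result
-- ===== Notes on version B (the rewrite author's own statement) =====
-- stated objective: alternative
-- what changed: A streams once over the list with a running per-element counter appending renamed items in order; B instead builds an element-to-index-positions map in one pass and then scatters numbered names onto a copy of the list by writing at the collected positions.
import Mathlib
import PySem

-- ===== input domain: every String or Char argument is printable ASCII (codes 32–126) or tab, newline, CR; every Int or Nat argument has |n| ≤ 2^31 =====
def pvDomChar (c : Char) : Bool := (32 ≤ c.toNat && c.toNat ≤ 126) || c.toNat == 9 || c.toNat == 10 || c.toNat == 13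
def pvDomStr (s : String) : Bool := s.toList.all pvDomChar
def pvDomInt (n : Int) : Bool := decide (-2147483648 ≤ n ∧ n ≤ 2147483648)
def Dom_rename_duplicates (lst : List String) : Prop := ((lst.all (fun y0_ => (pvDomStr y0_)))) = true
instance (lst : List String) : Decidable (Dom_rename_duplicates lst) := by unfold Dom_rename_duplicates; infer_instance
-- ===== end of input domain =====

-- B re-decomposes the task: instead of A's single streaming pass with a running
-- per-element counter, B collects each element's index positions in one pass and then
-- scatters numbered names onto a copy of the list (objective: alternative, same cost).

-- "{}-{}".format(s, n)  — shared by both sources; exact over List Char (String.ofList/toList, no opaque String ops)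
def pvFmt (s : String) (n : Int) : String := String.ofList (s.toList ++ '-' :: PySem.Int.toChars n)

-- ===== PORT A =====
def rename_duplicates (lst : List String) : List String :=
  let freq := PySem.Dict.counter lst
  (lst.foldl (fun (st : PySem.Dict String Int × List String) item =>
      if freq.getD item 0 > 1 then
        let occ := st.1.modify item 0 (fun v => v + 1)
        (occ, st.2 ++ [pvFmt item (occ.getD item 0)])
      else (st.1, st.2 ++ [item]))
    (PySem.Dict.empty, [])).2

-- ===== PORT B =====
def rename_duplicates_alt (lst : List String) : List String :=
  let pos := (PySem.List.enumerate lst 0).foldl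
    (fun (d : PySem.Dict String (List Int)) p => d.modify p.2 [] (fun v => v ++ [p.1]))
    PySem.Dict.empty
  pos.items.foldl (fun result kv =>
      if kv.2.length > 1 then
        (PySem.List.enumerate kv.2 1).foldl
          (fun r p => PySem.List.pySetD r p.2 (pvFmt kv.1 p.1)) result
      else result)
    lst

-- ===== PRECONDITION & SPEC =====
def Spec_rename_duplicates (lst : List String) (out : List String) : Prop := out = rename_duplicates_alt lst
instance (lst : List String) (out : List String) : Decidable (Spec_rename_duplicates lst out) := by unfold Spec_rename_duplicates; infer_instance

-- ===== CLAIM (what is proved, stated in full; the proofs are below) =====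
def Claim_equal_rename_duplicates : Prop := ∀ (lst : List String), Dom_rename_duplicates lst → Spec_rename_duplicates lst (rename_duplicates lst)

-- ===== LEMMAS AND PROOFS =====

-- the common pointwise target: element i of the answer
def tgt (lst : List String) (i : Nat) : String :=
  let x := lst.getD i ""
  if lst.count x > 1 then pvFmt x ((lst.take (i+1)).count x : Int) else x

-- positions (Nat indices) of k in xs, front to back
def posN : List String → String → List Nat
  | [], _ => []
  | x :: xs, k => if x = k then 0 :: (posN xs k).map (· + 1) else (posN xs k).map (· + 1)

theorem mem_map_add_one (l : List Nat) (j : Nat) : (j + 1) ∈ l.map (· + 1) ↔ j ∈ l := by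
  simp only [List.mem_map]
  constructor
  · rintro ⟨a, ha, h⟩
    have : a = j := by omega
    subst this; exact ha
  · intro h; exact ⟨j, h, rfl⟩

theorem zero_not_mem_map_add_one (l : List Nat) : (0 : Nat) ∉ l.map (· + 1) := by
  simp only [List.mem_map]
  rintro ⟨a, _, h⟩; omega

theorem mem_posN (xs : List String) (k : String) : ∀ (j : Nat),
    j ∈ posN xs k ↔ j < xs.length ∧ xs.getD j "" = k := by
  induction xs with
  | nil => intro j; simp [posN]
  | cons x xs ih =>
    intro j
    cases j with
    | zero =>
      by_cases hx : x = k <;> simp [posN, hx, zero_not_mem_map_add_one]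
    | succ j =>
      have hmm := mem_map_add_one (posN xs k) j
      by_cases hx : x = k <;>
        · simp only [posN, hx, if_pos, if_neg, not_false_iff, List.mem_cons,
            Nat.succ_ne_zero, false_or, hmm, ih, List.length_cons,
            List.getD_cons_succ]
          exact and_congr_left (fun _ => by omega)


theorem nodup_posN (xs : List String) (k : String) : (posN xs k).Nodup := by
  have hinj : Function.Injective (fun x : Nat => x + 1) := by intro a b h; dsimp only at h; omega
  induction xs with
  | nil => simp [posN]
  | cons x xs ih =>
    have hm : ((posN xs k).map (· + 1)).Nodup := (List.nodup_map_iff hinj).mpr ih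
    by_cases hx : x = k
    · simp only [posN, hx, if_pos]
      exact List.nodup_cons.mpr ⟨zero_not_mem_map_add_one _, hm⟩
    · simpa [posN, hx] using hm

theorem length_posN (xs : List String) (k : String) : (posN xs k).length = xs.count k := by
  induction xs with
  | nil => simp [posN]
  | cons x xs ih =>
    by_cases hx : x = k
    · have hxk : (x == k) = true := by simp [hx]
      simp [posN, hx, List.count_cons, ih, hxk]
    · have hxk : (x == k) = false := by simp [hx]
      simp [posN, hx, List.count_cons, ih, hxk]

theorem idxOf_map_add_one (l : List Nat) (j : Nat) :
    (l.map (· + 1)).idxOf (j + 1) = l.idxOf j := by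
  induction l with
  | nil => simp
  | cons a l ih =>
    by_cases h : a = j
    · simp [h]
    · simp only [List.map_cons, List.idxOf_cons, ih]
      have h1 : ((a + 1 : Nat) == (j + 1 : Nat)) = false := by simp; omega
      have h2 : ((a : Nat) == j) = false := by simp [h]
      simp [h1, h2, ih]

theorem idxOf_posN (xs : List String) (k : String) : ∀ (j : Nat),
    j < xs.length → xs.getD j "" = k →
    (posN xs k).idxOf j = (xs.take j).count k := by
  induction xs with
  | nil => intro j h; simp at h
  | cons x xs ih =>
    intro j hj hk
    cases j with
    | zero =>
      simp at hk
      simp [posN, hk]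
    | succ j =>
      simp only [List.length_cons] at hj
      simp only [List.getD_cons_succ] at hk
      by_cases hx : x = k
      · have h0 : ((0 : Nat) == j + 1) = false := by simp
        simp [posN, hx, List.idxOf_cons, h0, idxOf_map_add_one, ih j (by omega) hk,
          List.count_cons, hx]
      · have hxk : (x == k) = false := by simp [hx]
        simp [posN, hx, idxOf_map_add_one, ih j (by omega) hk, List.count_cons, hxk]

theorem posL_eq (xs : List String) (k : String) : ∀ (s : Int),
    ((PySem.List.enumerate xs s).filter (fun p => p.2 == k)).map (·.1)
      = (posN xs k).map (fun j : Nat => s + (j : Int)) := by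
  induction xs with
  | nil => intro s; simp [posN]
  | cons x xs ih =>
    intro s
    by_cases hx : x = k
    · subst hx
      simp only [PySem.List.enumerate_cons, List.filter_cons, beq_self_eq_true, if_true,
        List.map_cons, posN, ih (s+1), List.map_map]
      refine List.cons_eq_cons.mpr ⟨by simp, ?_⟩
      apply List.map_congr_left; intro a _; simp; omega
    · have hxk : (x == k) = false := by simp [hx]
      simp only [PySem.List.enumerate_cons, List.filter_cons, hxk, posN, hx, if_neg,
        Bool.false_eq_true, not_false_iff, ih (s+1), List.map_map]
      apply List.map_congr_left; intro a _; simp; omega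

theorem count_take_succ (lst : List String) (i : Nat) (k : String)
    (hi : i < lst.length) (hk : lst.getD i "" = k) :
    (lst.take (i+1)).count k = (lst.take i).count k + 1 := by
  have h1 : lst.take (i+1) = lst.take i ++ [lst[i]] := by
    rw [List.take_add_one]
    simp [List.getElem?_eq_getElem hi]
  rw [h1, List.count_append]
  have : lst[i] = k := by rw [← hk, List.getD_eq_getElem lst "" hi]
  simp [this]

theorem inner_len (k : String) : ∀ (l : List (Int × Int)) (r : List String),
    (l.foldl (fun r p => PySem.List.pySetD r p.2 (pvFmt k p.1)) r).length = r.length := by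
  intro l
  induction l with
  | nil => intro r; rfl
  | cons p l ih => intro r; rw [List.foldl_cons, ih, PySem.List.length_pySetD]

theorem inner_write (k : String) : ∀ (idxs : List Nat) (s : Int) (r : List String),
    idxs.Nodup → (∀ j ∈ idxs, j < r.length) → ∀ (i : Nat),
    ((PySem.List.enumerate (idxs.map (fun j : Nat => (j : Int))) s).foldl
        (fun r p => PySem.List.pySetD r p.2 (pvFmt k p.1)) r)[i]?
      = if i ∈ idxs then some (pvFmt k (s + (idxs.idxOf i : Int))) else r[i]? := by
  intro idxs
  induction idxs with
  | nil => intro s r _ _ i; simp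
  | cons j js ih =>
    intro s r hnd hb i
    have hjlen : j < r.length := hb j (List.mem_cons_self)
    have hnd' := (List.nodup_cons.mp hnd)
    rw [List.map_cons, PySem.List.enumerate_cons, List.foldl_cons]
    have hr1 : PySem.List.pySetD r (j : Int) (pvFmt k s) = r.set j (pvFmt k s) :=
      PySem.List.pySetD_natCast r j _
    rw [hr1, ih (s+1) _ hnd'.2 (by intro a ha; rw [List.length_set]; exact hb a (List.mem_cons_of_mem _ ha))]
    by_cases hmem : i ∈ js
    · have hij : i ≠ j := fun h => hnd'.1 (h ▸ hmem)
      have : (j == i) = false := by simp; exact fun h => hij h.symm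
      simp only [if_pos hmem, if_pos (List.mem_cons_of_mem _ hmem), List.idxOf_cons, this,
        cond_false]
      congr 2
      push_cast
      ring
    · by_cases hij : i = j
      · subst hij
        simp only [if_neg hmem, if_pos (List.mem_cons_self), List.idxOf_cons, beq_self_eq_true,
          cond_true]
        rw [List.getElem?_set_self (by omega)]
        simp
      · have : ¬ i ∈ j :: js := by simp [hij, hmem]
        rw [if_neg hmem, if_neg this, List.getElem?_set_ne (by omega)]

-- ===== B side =====

theorem outer_len : ∀ (gs : List (String × List Int)) (r : List String),
    (gs.foldl (fun result kv =>
        if kv.2.length > 1 then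
          (PySem.List.enumerate kv.2 1).foldl
            (fun r p => PySem.List.pySetD r p.2 (pvFmt kv.1 p.1)) result
        else result) r).length = r.length := by
  intro gs
  induction gs with
  | nil => intro r; rfl
  | cons kv gs ih =>
    intro r
    rw [List.foldl_cons, ih]
    by_cases h : kv.2.length > 1
    · rw [if_pos h, inner_len]
    · rw [if_neg h]

theorem outer_write (lst : List String) : ∀ (gs : List (String × List Int)) (r : List String),
    (∀ p ∈ gs, p.2 = (posN lst p.1).map (fun j : Nat => (j : Int))) →
    (gs.map (·.1)).Nodup →
    r.length = lst.length →
    (∀ i, i < lst.length → r[i]? = some (if lst.getD i "" ∈ gs.map (·.1) then lst.getD i "" else tgt lst i)) →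
    ∀ i, i < lst.length →
      (gs.foldl (fun result kv =>
          if kv.2.length > 1 then
            (PySem.List.enumerate kv.2 1).foldl
              (fun r p => PySem.List.pySetD r p.2 (pvFmt kv.1 p.1)) result
          else result) r)[i]? = some (tgt lst i) := by
  intro gs
  induction gs with
  | nil =>
    intro r _ _ _ hr i hi
    simpa using hr i hi
  | cons kv gs ih =>
    intro r hg hnd hlen hr i hi
    obtain ⟨k, idxs⟩ := kv
    have hidxs : idxs = (posN lst k).map (fun j : Nat => (j : Int)) := by simpa using hg (k, idxs) (by simp)
    have hnd2 : k ∉ List.map (fun x => x.1) gs ∧ (List.map (fun x => x.1) gs).Nodup := by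
      have h := hnd
      rw [List.map_cons, List.nodup_cons] at h
      exact h
    have hndk := hnd2.1
    have hnd' := hnd2.2
    rw [List.foldl_cons]
    -- the new accumulator after processing this group
    set r' := (if idxs.length > 1 then
        (PySem.List.enumerate idxs 1).foldl
          (fun r p => PySem.List.pySetD r p.2 (pvFmt k p.1)) r
      else r) with hr'def
    have hlen' : r'.length = lst.length := by
      rw [hr'def]; by_cases h : idxs.length > 1
      · rw [if_pos h, inner_len, hlen]
      · rw [if_neg h, hlen]
    have hcount : idxs.length = lst.count k := by
      rw [hidxs, List.length_map, length_posN]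
    refine ih r' (fun p hp => hg p (List.mem_cons_of_mem _ hp)) hnd' hlen' ?_ i hi
    -- re-establish the invariant
    intro i hi
    have hgetDmem : lst.getD i "" ∈ lst := by
      rw [List.getD_eq_getElem lst "" hi]; exact List.getElem_mem hi
    by_cases hik : lst.getD i "" = k
    · -- this position's key is the group just processed
      rw [hik, if_neg hndk]
      by_cases hgt : idxs.length > 1
      · -- written by the scatter pass
        have himem : i ∈ posN lst k := (mem_posN lst k i).mpr ⟨hi, hik⟩
        rw [hr'def, if_pos hgt, hidxs,
          inner_write k (posN lst k) 1 r (nodup_posN lst k)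
            (by intro j hj; rw [hlen]; exact ((mem_posN lst k j).mp hj).1) i,
          if_pos himem, idxOf_posN lst k i hi hik]
        simp only [tgt]
        rw [hik]
        have hcnt : lst.count k > 1 := by rw [← hcount]; exact hgt
        rw [if_pos hcnt, count_take_succ lst i k hi hik]
        congr 2
        push_cast
        ring
      · -- singleton group: nothing written, and tgt is the element itself
        have hcnt1 : lst.count k = 1 := by
          have : 0 < lst.count k := List.count_pos_iff.mpr (hik ▸ hgetDmem)
          omega
        have htg : tgt lst i = lst.getD i "" := by
          simp only [tgt]
          rw [hik, hcnt1]
          simp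
        have hmemc : lst.getD i "" ∈ List.map (fun x => x.1) ((k, idxs) :: gs) := by
          simp only [List.map_cons, List.mem_cons]
          exact Or.inl hik
        rw [htg, hik, hr'def, if_neg hgt, hr i hi, if_pos hmemc, hik]
    · -- untouched position
      have hval : r'[i]? = r[i]? := by
        rw [hr'def]; by_cases hgt : idxs.length > 1
        · rw [if_pos hgt, hidxs,
            inner_write k (posN lst k) 1 r (nodup_posN lst k)
              (by intro j hj; rw [hlen]; exact ((mem_posN lst k j).mp hj).1) i,
            if_neg (by intro hmm; exact hik ((mem_posN lst k i).mp hmm).2)]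
        · rw [if_neg hgt]
      rw [hval, hr i hi]
      have hiff : lst.getD i "" ∈ List.map (fun x => x.1) ((k, idxs) :: gs) ↔
          lst.getD i "" ∈ List.map (fun x => x.1) gs := by
        simp only [List.map_cons, List.mem_cons]
        exact or_iff_right hik
      congr 1
      by_cases hmem : lst.getD i "" ∈ List.map (fun x => x.1) gs
      · rw [if_pos (hiff.mpr hmem), if_pos hmem]
      · rw [if_neg (fun hh => hmem (hiff.mp hh)), if_neg hmem]

theorem B_pos_getD (lst : List String) (k : String) :
    ((PySem.List.enumerate lst 0).foldl
        (fun (d : PySem.Dict String (List Int)) p => d.modify p.2 [] (fun v => v ++ [p.1]))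
        PySem.Dict.empty).getD k []
      = (posN lst k).map (fun j : Nat => (j : Int)) := by
  have h1 : (PySem.List.enumerate lst 0).foldl
      (fun (d : PySem.Dict String (List Int)) p => d.modify p.2 [] (fun v => v ++ [p.1]))
      PySem.Dict.empty
    = ((PySem.List.enumerate lst 0).map (fun p => (p.2, p.1))).foldl
      (fun (d : PySem.Dict String (List Int)) q => d.modify q.1 [] (fun v => v ++ [q.2]))
      PySem.Dict.empty := by
    rw [List.foldl_map]
  rw [h1, PySem.Dict.getD_foldl_modify_append]
  rw [List.filter_map]
  have h2 : ((fun q : String × Int => q.1 == k) ∘ (fun p : Int × String => (p.2, p.1)))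
      = fun p : Int × String => p.2 == k := rfl
  rw [h2, List.map_map]
  have h3 : ((fun q : String × Int => q.2) ∘ (fun p : Int × String => (p.2, p.1)))
      = fun p : Int × String => p.1 := rfl
  rw [h3]
  have := posL_eq lst k 0
  rw [this]
  simp

theorem B_keys (lst : List String) :
    ((PySem.List.enumerate lst 0).foldl
        (fun (d : PySem.Dict String (List Int)) p => d.modify p.2 [] (fun v => v ++ [p.1]))
        PySem.Dict.empty).keys
      = PySem.Set.ofList lst := by
  rw [PySem.Dict.keys_foldl_modify_key (PySem.List.enumerate lst 0) (fun p => p.2) []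
      (fun d x => fun v => v ++ [x.1]) PySem.Dict.empty]
  rw [PySem.Dict.keys_empty, PySem.List.map_snd_enumerate, PySem.Set.update_nil_left]

theorem B_get (lst : List String) (i : Nat) (hi : i < lst.length) :
    (rename_duplicates_alt lst)[i]? = some (tgt lst i) := by
  unfold rename_duplicates_alt
  set pos := (PySem.List.enumerate lst 0).foldl
    (fun (d : PySem.Dict String (List Int)) p => d.modify p.2 [] (fun v => v ++ [p.1]))
    PySem.Dict.empty with hpos
  have hknd : pos.keys.Nodup := by
    rw [hpos]
    exact PySem.Dict.nodup_keys_foldl_modify_key _ _ _ _ _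
      (by rw [PySem.Dict.keys_empty]; exact List.nodup_nil)
  have hitems : pos.items = pos.keys.map (fun k => (k, pos.getD k [])) :=
    PySem.Dict.items_eq_map_keys pos hknd []
  have hfst : pos.items.map (·.1) = pos.keys := by
    rw [hitems, List.map_map]
    have hcomp : ((fun x : String × List Int => x.1) ∘ (fun k : String => (k, pos.getD k []))) = id := rfl
    rw [hcomp, List.map_id]
  apply outer_write lst pos.items lst
  · intro p hp
    rw [hitems] at hp
    obtain ⟨k, _, hk⟩ := List.mem_map.mp hp
    rw [← hk]
    exact B_pos_getD lst k
  · rw [hfst]; exact hknd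
  · rfl
  · intro j hj
    have hmem : lst.getD j "" ∈ pos.items.map (·.1) := by
      rw [hfst, B_keys, PySem.Set.mem_ofList]
      rw [List.getD_eq_getElem _ "" hj]
      exact List.getElem_mem hj
    rw [if_pos hmem, List.getElem?_eq_getElem hj, List.getD_eq_getElem _ "" hj]
  · exact hi

theorem B_len (lst : List String) : (rename_duplicates_alt lst).length = lst.length := by
  unfold rename_duplicates_alt
  rw [outer_len]

-- ===== A side =====

def modelA (lst : List String) : List String → List String → List String
  | _, [] => []
  | pre, x :: xs =>
      (if lst.count x > 1 then pvFmt x ((pre.count x : Int) + 1) else x) :: modelA lst (pre ++ [x]) xs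

theorem A_fold (lst : List String) : ∀ (xs : List String) (occ : PySem.Dict String Int)
    (acc pre : List String),
    (∀ x, lst.count x > 1 → occ.getD x 0 = (pre.count x : Int)) →
    (xs.foldl (fun (st : PySem.Dict String Int × List String) item =>
        if (PySem.Dict.counter lst).getD item 0 > 1 then
          let occ := st.1.modify item 0 (fun v => v + 1)
          (occ, st.2 ++ [pvFmt item (occ.getD item 0)])
        else (st.1, st.2 ++ [item])) (occ, acc)).2
      = acc ++ modelA lst pre xs := by
  intro xs
  induction xs with
  | nil => intro occ acc pre _; simp [modelA]
  | cons x xs ih =>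
    intro occ acc pre hocc
    rw [List.foldl_cons]
    by_cases hc : lst.count x > 1
    · have hcond : ((PySem.Dict.counter lst).getD x 0 > 1) := by
        rw [PySem.Dict.getD_counter]
        exact_mod_cast hc
      rw [if_pos hcond]
      have hself : ((occ.modify x 0 (fun v => v + 1)).getD x 0) = (pre.count x : Int) + 1 := by
        rw [PySem.Dict.getD_modify_self, hocc x hc]
      have hocc' : ∀ y, lst.count y > 1 →
          (occ.modify x 0 (fun v => v + 1)).getD y 0 = ((pre ++ [x]).count y : Int) := by
        intro y hy
        rw [PySem.Dict.getD_modify]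
        by_cases hyx : y = x
        · subst hyx
          rw [if_pos rfl, hocc y hy, List.count_append]
          push_cast
          simp
        · rw [if_neg hyx, hocc y hy, List.count_append]
          have : List.count y [x] = 0 := by
            simp [List.count_singleton]
            exact fun h => hyx h.symm
          rw [this]
          simp
      rw [ih _ _ _ hocc']
      simp only [modelA, if_pos hc, hself]
      simp
    · have hcond : ¬ ((PySem.Dict.counter lst).getD x 0 > 1) := by
        rw [PySem.Dict.getD_counter]
        exact_mod_cast hc
      rw [if_neg hcond]
      have hocc' : ∀ y, lst.count y > 1 →
          occ.getD y 0 = ((pre ++ [x]).count y : Int) := by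
        intro y hy
        rw [hocc y hy, List.count_append]
        have : List.count y [x] = 0 := by
          simp [List.count_singleton]
          intro h
          subst h
          exact hc hy
        rw [this]
        simp
      rw [ih _ _ _ hocc']
      simp only [modelA, if_neg hc]
      simp

theorem length_modelA (lst : List String) : ∀ (xs pre : List String),
    (modelA lst pre xs).length = xs.length := by
  intro xs
  induction xs with
  | nil => intro pre; simp [modelA]
  | cons x xs ih => intro pre; simp [modelA, ih]

theorem modelA_get (lst : List String) : ∀ (xs pre : List String) (i : Nat),
    pre ++ xs = lst → i < xs.length →
    (modelA lst pre xs)[i]? = some (tgt lst (pre.length + i)) := by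
  intro xs
  induction xs with
  | nil => intro pre i _ h; simp at h
  | cons x xs ih =>
    intro pre i hpre hi
    cases i with
    | zero =>
      have hx : lst.getD pre.length "" = x := by
        rw [← hpre]
        rw [List.getD_eq_getElem _ "" (by simp)]
        simp
      have htake : lst.take (pre.length + 1) = pre ++ [x] := by
        rw [← hpre, List.take_append]
        simp
      simp only [modelA, List.getElem?_cons_zero, Nat.add_zero]
      simp only [tgt, hx, htake]
      by_cases hc : lst.count x > 1
      · rw [if_pos hc, if_pos hc]
        congr 2
        rw [List.count_append]
        push_cast
        simp
      · rw [if_neg hc, if_neg hc]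
    | succ i =>
      simp only [modelA, List.getElem?_cons_succ]
      have := ih (pre ++ [x]) i (by simpa using hpre) (by simpa using hi)
      rw [this]
      congr 2
      simp
      omega

theorem A_eq_model (lst : List String) : rename_duplicates lst = modelA lst [] lst := by
  unfold rename_duplicates
  rw [A_fold lst lst PySem.Dict.empty [] [] (by intro x _; simp [PySem.Dict.getD])]
  simp

theorem A_len (lst : List String) : (rename_duplicates lst).length = lst.length := by
  rw [A_eq_model, length_modelA]

theorem A_get (lst : List String) (i : Nat) (hi : i < lst.length) :
    (rename_duplicates lst)[i]? = some (tgt lst i) := by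
  rw [A_eq_model]
  have := modelA_get lst lst [] i (by simp) hi
  simpa using this

-- ===== VERDICT (by name: the statement is the Claim_ definition above) =====
theorem rename_duplicates_spec : Claim_equal_rename_duplicates := by
  intro lst _
  unfold Spec_rename_duplicates
  apply List.ext_getElem?
  intro i
  by_cases hi : i < lst.length
  · rw [A_get lst i hi, B_get lst i hi]
  · rw [List.getElem?_eq_none (by rw [A_len]; omega), List.getElem?_eq_none (by rw [B_len]; omega)]
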